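-- pv_equiv track=rewrite | github.com/hszhoushen/FPANet | model/data_partition.py | integrate_sample_id
-- ===== SOURCE A (Python) =====
-- def integrate_sample_id(sample_list):
--     sample_id_dict = {}
--     for i in range(len(sample_list)):
--         sample_ = sample_list[i].split('/')
--         sample_id = sample_[1][:5]
--
--         if sample_id not in sample_id_dict:
--              sample_id_dict[sample_id] = []
--
--         sample_id_dict[sample_id].append(sample_list[i])
--
--     return sample_id_dict
-- ===== SOURCE B (Python) =====
-- def integrate_sample_id(sample_list):
--     pairs = [(s.split('/')[1][:5], s) for s in sample_list]
--     keys = list(dict.fromkeys(k for k, _ in pairs))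
--     return {k: [s for k2, s in pairs if k2 == k] for k in keys}
-- ===== Notes on version B (the rewrite author's own statement) =====
-- stated objective: alternative
-- what changed: Replaces the single-pass mutable-dict append loop by a two-phase comprehension: precompute (key, sample) pairs, dedup keys in first-occurrence order, then build each group with a per-key filter.
import Mathlib
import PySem

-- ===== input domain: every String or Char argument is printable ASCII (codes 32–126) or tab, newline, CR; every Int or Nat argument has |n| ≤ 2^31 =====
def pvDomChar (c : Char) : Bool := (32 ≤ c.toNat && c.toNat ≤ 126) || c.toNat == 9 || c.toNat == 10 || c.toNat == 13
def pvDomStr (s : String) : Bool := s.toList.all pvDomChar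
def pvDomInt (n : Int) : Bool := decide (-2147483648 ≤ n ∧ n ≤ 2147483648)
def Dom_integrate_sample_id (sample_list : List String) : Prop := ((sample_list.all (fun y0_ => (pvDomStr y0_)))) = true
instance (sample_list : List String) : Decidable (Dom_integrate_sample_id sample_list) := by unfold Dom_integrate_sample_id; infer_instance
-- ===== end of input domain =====

-- B replaces A's single-pass mutable-dict append loop by precomputed (key, sample)
-- pairs, ordered key dedup and a per-key filter; same return value (alternative objective).

-- ===== PORT A =====
-- loop body: split, take sample_[1][:5], ensure key, append; pyGetD with "" is exact on Pre_
def pvStepA (d : PySem.Dict String (List String)) (s : String) : PySem.Dict String (List String) :=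
  let sample_ := (PySem.Str.split? s "/").getD []
  let sample_id := PySem.Str.slice (PySem.List.pyGetD sample_ 1 "") none (some 5)
  (if d.contains sample_id then d else d.insert sample_id []).modify sample_id [] (fun v => v ++ [s])

def integrate_sample_id (sample_list : List String) : List (String × List String) :=
  ((PySem.List.pyRange 0 (sample_list.length : Int) 1).foldl
    (fun d i => pvStepA d (PySem.List.pyGetD sample_list i "")) PySem.Dict.empty).items

-- ===== PORT B =====
def pvKeyB (s : String) : String :=
  PySem.Str.slice (PySem.List.pyGetD ((PySem.Str.split? s "/").getD []) 1 "") none (some 5)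

def integrate_sample_id_alt (sample_list : List String) : List (String × List String) :=
  let pairs := sample_list.map (fun s => (pvKeyB s, s))
  let keys := PySem.List.dedup (pairs.map (·.1))
  keys.map (fun k => (k, (pairs.filter (fun p => p.1 == k)).map (·.2)))

-- ===== PRECONDITION & SPEC =====
-- Pre_ excludes exactly the inputs where some string lacks '/': there A (and B) raise IndexError.
def Pre_integrate_sample_id (sample_list : List String) : Prop :=
  ∀ s ∈ sample_list, '/' ∈ s.toList
instance (sample_list : List String) : Decidable (Pre_integrate_sample_id sample_list) := by
  unfold Pre_integrate_sample_id; infer_instance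

def pvWitness_integrate_sample_id : List String := ["a/bcdefg", "x/bcdeq", "a/bcdef"]

def Spec_integrate_sample_id (sample_list : List String) (out : List (String × List String)) : Prop := out = integrate_sample_id_alt sample_list
instance (sample_list : List String) (out : List (String × List String)) : Decidable (Spec_integrate_sample_id sample_list out) := by unfold Spec_integrate_sample_id; infer_instance

-- ===== CLAIM (what is proved, stated in full; the proofs are below) =====
def Claim_equal_integrate_sample_id : Prop := ∀ (sample_list : List String), Dom_integrate_sample_id sample_list → Pre_integrate_sample_id sample_list → Spec_integrate_sample_id sample_list (integrate_sample_id sample_list)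

-- ===== LEMMAS AND PROOFS =====

-- A's 'if sid not in d: d[sid] = []' followed by the append is one modify with default []
theorem pvStepA_eq_modify (d : PySem.Dict String (List String)) (s : String) :
    pvStepA d s = d.modify (pvKeyB s) [] (fun v => v ++ [s]) := by
  unfold pvStepA pvKeyB
  by_cases h : d.contains (PySem.Str.slice
      (PySem.List.pyGetD ((PySem.Str.split? s "/").getD []) 1 "") none (some 5)) = true
  · simp [h]
  · simp only [Bool.not_eq_true] at h
    simp [h, PySem.Dict.modify, PySem.Dict.insert_insert_self,
      PySem.Dict.getD_of_not_contains]

-- the grouping fold, read off through keys/getD of the final dict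
theorem pvFoldItems (l : List String) :
    ((l.map (fun s => (pvKeyB s, s))).foldl
        (fun (d : PySem.Dict String (List String)) p => d.modify p.1 [] (fun v => v ++ [p.2]))
        PySem.Dict.empty).items
      = integrate_sample_id_alt l := by
  have hkeys : ((l.map (fun s => (pvKeyB s, s))).foldl
        (fun (d : PySem.Dict String (List String)) p => d.modify p.1 [] (fun v => v ++ [p.2]))
        PySem.Dict.empty).keys = PySem.List.dedup ((l.map (fun s => (pvKeyB s, s))).map (·.1)) := by
    rw [PySem.Dict.keys_foldl_modify_key]
    simp [PySem.Dict.keys_empty, PySem.Set.update_nil_left]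
  have hnd : ((l.map (fun s => (pvKeyB s, s))).foldl
        (fun (d : PySem.Dict String (List String)) p => d.modify p.1 [] (fun v => v ++ [p.2]))
        PySem.Dict.empty).keys.Nodup := by
    rw [hkeys]; exact PySem.List.nodup_dedup _
  rw [PySem.Dict.items_eq_map_keys _ hnd [], hkeys]
  unfold integrate_sample_id_alt
  apply List.map_congr_left
  intro k hk
  rw [PySem.Dict.getD_foldl_modify_append]
  simp

-- ===== VERDICT (by name: the statement is the Claim_ definition above) =====
theorem integrate_sample_id_spec : Claim_equal_integrate_sample_id := by
  intro l _ _
  unfold Spec_integrate_sample_id integrate_sample_id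
  rw [PySem.List.foldl_pyRange_zero_pyGetD' l "" pvStepA]
  have hmap : l.foldl pvStepA PySem.Dict.empty
      = (l.map (fun s => (pvKeyB s, s))).foldl
          (fun (d : PySem.Dict String (List String)) p => d.modify p.1 [] (fun v => v ++ [p.2]))
          PySem.Dict.empty := by
    rw [List.foldl_map]
    exact PySem.List.foldl_congr_mem l _ _ _ (fun acc x _ => pvStepA_eq_modify acc x)
  rw [hmap]
  exact pvFoldItems l
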